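-- pv_equiv track=rewrite | github.com/Qiong-Mengzi/HomoNumExpr | HomoNumber.py | _SplitAllSubStr
-- ===== SOURCE A (Python) =====
-- def _SplitAllSubStr(s: str):
--     def backtrack(start: int, path: tuple[str, ...]):
--         if start == len(s):
--             result.append(path)
--         else:
--             for end in range(start + 1, len(s) + 1):
--                 if s[start:end] != '':
--                     backtrack(end, (s[start:end],) + path)
--
--     result: list[tuple[str, ...]] = []
--     backtrack(0, ())
--     return [(t :=list(_), t.reverse(), t)[-1] for _ in result]
-- ===== SOURCE B (Python) =====
-- def _SplitAllSubStr(s: str):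
--     n = len(s)
--     # bottom-up DP over suffixes: F[i] = all partitions of s[i:], computed iteratively
--     F = [None] * (n + 1)
--     F[n] = [[]]
--     for i in range(n - 1, -1, -1):
--         F[i] = [[s[i:e]] + rest for e in range(i + 1, n + 1) for rest in F[e]]
--     return F[0]
-- ===== Notes on version B (the rewrite author's own statement) =====
-- stated objective: alternative
-- what changed: Replaced the shared result list, accumulator-passing recursive backtracking and the prepend-then-reverse tuple trick with an iterative bottom-up dynamic-programming table F[i] of all partitions of each suffix s[i:], filled from i=n down to 0 with no recursion.
import Mathlib
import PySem

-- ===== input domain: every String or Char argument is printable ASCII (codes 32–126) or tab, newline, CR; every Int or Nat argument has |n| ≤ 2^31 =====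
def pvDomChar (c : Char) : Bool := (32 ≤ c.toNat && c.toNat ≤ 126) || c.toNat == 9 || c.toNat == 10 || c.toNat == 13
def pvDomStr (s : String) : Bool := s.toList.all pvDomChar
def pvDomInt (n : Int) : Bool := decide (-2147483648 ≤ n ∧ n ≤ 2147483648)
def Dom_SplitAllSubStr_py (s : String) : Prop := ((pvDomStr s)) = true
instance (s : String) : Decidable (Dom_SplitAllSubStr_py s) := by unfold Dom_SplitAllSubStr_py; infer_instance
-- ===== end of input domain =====

-- B replaces A's recursive accumulator-passing backtracking (shared result list,
-- prepend-then-reverse) by an iterative bottom-up DP table of suffix partitions (objective: alternative).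

-- ===== PORT A =====
-- backtrack(start, path): DFS appending finished paths (built by left-prepending) to the shared result list.
def pvBackA (cs : List Char) (start : Int) (path : List String) (result : List (List String)) :
    List (List String) :=
  if start = (cs.length : Int) then result ++ [path]
  else
    (PySem.List.pyRange (start + 1) ((cs.length : Int) + 1) 1).attach.foldl
      (fun res e =>
        let chunk := String.ofList (PySem.List.slice cs (some start) (some e.1))
        if chunk ≠ "" then pvBackA cs e.1 (chunk :: path) res else res)
      result
termination_by ((cs.length : Int) + 1 - start).toNat
decreasing_by
  have h := (PySem.List.mem_pyRange_one).mp e.2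
  omega

-- final comprehension: each stored tuple is turned into a list and reversed in place
def SplitAllSubStr_py (s : String) : List (List String) :=
  (pvBackA s.toList 0 [] []).map (fun t => t.reverse)

-- ===== PORT B =====
-- the table F, kept as a list of rows [F[i], F[i+1], …, F[n]]; the loop
-- 'for i in range(n-1, -1, -1)' prepends the freshly computed row F[i].
def pvRowsB (cs : List Char) : List (List (List String)) :=
  (PySem.List.pyRange ((cs.length : Int) - 1) (-1) (-1)).foldl
    (fun tab i =>
      ((PySem.List.pyRange (i + 1) ((cs.length : Int) + 1) 1).flatMap
        (fun e => (tab.getD (e - i - 1).toNat []).map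
          (fun rest => String.ofList (PySem.List.slice cs (some i) (some e)) :: rest))) :: tab)
    [[[]]]

def SplitAllSubStr_py_alt (s : String) : List (List String) :=
  (pvRowsB s.toList).getD 0 []

-- ===== PRECONDITION & SPEC =====
def Spec_SplitAllSubStr_py (s : String) (out : List (List String)) : Prop := out = SplitAllSubStr_py_alt s
instance (s : String) (out : List (List String)) : Decidable (Spec_SplitAllSubStr_py s out) := by unfold Spec_SplitAllSubStr_py; infer_instance

-- ===== CLAIM (what is proved, stated in full; the proofs are below) =====
def Claim_equal_SplitAllSubStr_py : Prop := ∀ (s : String), Dom_SplitAllSubStr_py s → Spec_SplitAllSubStr_py s (SplitAllSubStr_py s)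

-- ===== LEMMAS AND PROOFS =====

-- proof-only helper: the mathematical suffix-partition function both ports are compared to
def pvFB (cs : List Char) (i : Int) : List (List String) :=
  if i = (cs.length : Int) then [[]]
  else
    (PySem.List.pyRange (i + 1) ((cs.length : Int) + 1) 1).attach.flatMap
      (fun e =>
        (pvFB cs e.1).map (fun rest => String.ofList (PySem.List.slice cs (some i) (some e.1)) :: rest))
termination_by ((cs.length : Int) + 1 - i).toNat
decreasing_by
  have h := (PySem.List.mem_pyRange_one).mp e.2
  omega

theorem pv_flatMap_attach {α β : Type} (l : List α) (g : α → List β) :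
    l.attach.flatMap (fun x => g x.1) = l.flatMap g := by
  conv_rhs => rw [← List.attach_map_subtype_val l, List.flatMap_map]

theorem pv_chunk_ne_empty (cs : List Char) (a b : Int) (h0 : 0 ≤ a) (hab : a < b)
    (hb : b ≤ (cs.length : Int)) :
    String.ofList (PySem.List.slice cs (some a) (some b)) ≠ "" := by
  intro h
  have hnil : PySem.List.slice cs (some a) (some b) = [] := by
    have := congrArg String.toList h
    simpa using this
  have hl : (PySem.List.slice cs (some a) (some b)).length = 0 := by rw [hnil]; rfl
  rw [PySem.List.length_slice] at hl
  rw [PySem.List.clampIdx_of_nonneg_of_le (by omega) hb,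
      PySem.List.clampIdx_of_nonneg_of_le h0 (by omega)] at hl
  omega

-- A-side invariant: the backtracking with accumulator equals the suffix partitions,
-- each reversed and extended by the pending path
theorem pv_key (cs : List Char) :
    ∀ (N : Nat) (start : Int), 0 ≤ start → (((cs.length : Int) + 1 - start).toNat ≤ N) →
    ∀ (path : List String) (result : List (List String)),
      pvBackA cs start path result
        = result ++ (pvFB cs start).map (fun p => p.reverse ++ path) := by
  intro N
  induction N with
  | zero =>
    intro start h0 hN path result
    have hs : start ≠ (cs.length : Int) := by omega
    rw [pvBackA, pvFB]
    simp only [if_neg hs]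
    rw [PySem.List.pyRange_one_eq_nil (by omega : (cs.length : Int) + 1 ≤ start + 1)]
    simp
  | succ N ih =>
    intro start h0 hN path result
    rw [pvBackA, pvFB]
    by_cases hs : start = (cs.length : Int)
    · simp [hs]
    · simp only [if_neg hs]
      rw [List.foldl_attach (f := fun res e =>
            let chunk := String.ofList (PySem.List.slice cs (some start) (some e))
            if chunk ≠ "" then pvBackA cs e (chunk :: path) res else res)]
      rw [pv_flatMap_attach _ (fun e => (pvFB cs e).map
            (fun rest => String.ofList (PySem.List.slice cs (some start) (some e)) :: rest))]
      have hmem : ∀ e ∈ PySem.List.pyRange (start + 1) ((cs.length : Int) + 1) 1,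
          start + 1 ≤ e ∧ e < (cs.length : Int) + 1 := by
        intro e he; exact (PySem.List.mem_pyRange_one).mp he
      generalize hgen : PySem.List.pyRange (start + 1) ((cs.length : Int) + 1) 1 = l at hmem ⊢
      clear hgen
      induction l generalizing result with
      | nil => simp
      | cons e t iht =>
        have he := hmem e (by simp)
        have hne : String.ofList (PySem.List.slice cs (some start) (some e)) ≠ "" :=
          pv_chunk_ne_empty cs start e h0 (by omega) (by omega)
        simp only [List.foldl_cons, List.flatMap_cons, if_pos hne]
        rw [ih e (by omega) (by omega)]
        rw [iht _ (fun x hx => hmem x (List.mem_cons_of_mem e hx))]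
        simp [List.map_map, Function.comp_def, List.append_assoc]

-- the table rows for indices j..n
def pvTabOf (cs : List Char) (j : Int) : List (List (List String)) :=
  (List.range ((cs.length : Int) - j + 1).toNat).map (fun k : Nat => pvFB cs (j + (k : Int)))

theorem pv_tabOf_getD (cs : List Char) (j e : Int) (h0 : 0 ≤ j) (hje : j ≤ e)
    (hen : e ≤ (cs.length : Int)) :
    (pvTabOf cs j).getD (e - j).toNat [] = pvFB cs e := by
  unfold pvTabOf
  have hk : (e - j).toNat < ((cs.length : Int) - j + 1).toNat := by omega
  rw [List.getD_eq_getElem _ _ (by rw [List.length_map, List.length_range]; exact hk)]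
  rw [List.getElem_map, List.getElem_range]
  congr 1
  omega

-- one loop step computes the row pvFB i from the table for i+1..n
theorem pv_row_step (cs : List Char) (i : Int) (h0 : 0 ≤ i) (hi : i < (cs.length : Int)) :
    ((PySem.List.pyRange (i + 1) ((cs.length : Int) + 1) 1).flatMap
        (fun e => ((pvTabOf cs (i + 1)).getD (e - i - 1).toNat []).map
          (fun rest => String.ofList (PySem.List.slice cs (some i) (some e)) :: rest)))
      = pvFB cs i := by
  rw [pvFB]
  have hs : i ≠ (cs.length : Int) := by omega
  rw [if_neg hs]
  rw [pv_flatMap_attach _ (fun e => (pvFB cs e).map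
        (fun rest => String.ofList (PySem.List.slice cs (some i) (some e)) :: rest))]
  apply List.flatMap_congr
  intro e he
  have hee := (PySem.List.mem_pyRange_one).mp he
  have : e - i - 1 = e - (i + 1) := by ring
  rw [this, pv_tabOf_getD cs (i + 1) e (by omega) (by omega) (by omega)]

theorem pv_tabOf_cons (cs : List Char) (i : Int) (h0 : 0 ≤ i) (hi : i < (cs.length : Int)) :
    pvTabOf cs i = pvFB cs i :: pvTabOf cs (i + 1) := by
  unfold pvTabOf
  have h1 : ((cs.length : Int) - i + 1).toNat = ((cs.length : Int) - (i + 1) + 1).toNat + 1 := by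
    omega
  rw [h1, List.range_succ_eq_map, List.map_cons, List.map_map]
  refine List.cons_eq_cons.mpr ⟨?_, ?_⟩
  · norm_num
  · apply List.map_congr_left
    intro k _
    simp only [Function.comp_apply]
    congr 1
    push_cast
    ring

-- folding the countdown loop from i down to 0 turns the table for i+1..n into the table for 0..n
theorem pv_fold_inv (cs : List Char) :
    ∀ (M : Nat) (i : Int), i < (cs.length : Int) → ((i + 1).toNat ≤ M) →
    (PySem.List.pyRange i (-1) (-1)).foldl
      (fun tab i =>
        ((PySem.List.pyRange (i + 1) ((cs.length : Int) + 1) 1).flatMap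
          (fun e => (tab.getD (e - i - 1).toNat []).map
            (fun rest => String.ofList (PySem.List.slice cs (some i) (some e)) :: rest))) :: tab)
      (pvTabOf cs (i + 1))
      = pvTabOf cs (min (i + 1) 0) := by
  intro M
  induction M with
  | zero =>
    intro i hi hM
    rw [PySem.List.pyRange_neg_one_eq_nil (by omega : i ≤ -1)]
    simp only [List.foldl_nil]
    congr 1
    omega
  | succ M ih =>
    intro i hi hM
    by_cases hneg : i ≤ -1
    · rw [PySem.List.pyRange_neg_one_eq_nil hneg]
      simp only [List.foldl_nil]
      congr 1
      omega
    · have h0 : 0 ≤ i := by omega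
      rw [PySem.List.pyRange_neg_one_cons (by omega : (-1 : Int) < i)]
      simp only [List.foldl_cons]
      rw [pv_row_step cs i h0 hi, ← pv_tabOf_cons cs i h0 hi]
      have := ih (i - 1) (by omega) (by omega)
      have hs : i - 1 + 1 = i := by ring
      rw [hs] at this
      rw [this]
      congr 1
      omega

-- B's result is pvFB cs 0
theorem pv_alt_eq (s : String) : SplitAllSubStr_py_alt s = pvFB s.toList 0 := by
  unfold SplitAllSubStr_py_alt pvRowsB
  set cs := s.toList with hcs
  by_cases hn : (cs.length : Int) = 0
  · rw [PySem.List.pyRange_neg_one_eq_nil (by omega)]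
    simp only [List.foldl_nil]
    rw [pvFB, if_pos (by omega)]
    rfl
  · have htab : pvTabOf cs ((cs.length : Int) - 1 + 1) = [[[]]] := by
      unfold pvTabOf
      have : ((cs.length : Int) - ((cs.length : Int) - 1 + 1) + 1).toNat = 1 := by omega
      rw [this]
      simp only [List.range_one, List.map_cons, List.map_nil]
      have h2 : (cs.length : Int) - 1 + 1 + ((0 : Nat) : Int) = (cs.length : Int) := by
        push_cast; ring
      rw [h2, pvFB, if_pos rfl]
    rw [← htab,
        pv_fold_inv cs ((cs.length : Int)).toNat ((cs.length : Int) - 1) (by omega) (by omega)]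
    have : min ((cs.length : Int) - 1 + 1) 0 = 0 := by omega
    rw [this]
    rw [pvTabOf, List.getD_eq_getElem _ _
        (by rw [List.length_map, List.length_range]; omega)]
    rw [List.getElem_map, List.getElem_range]
    norm_num

-- ===== VERDICT (by name: the statement is the Claim_ definition above) =====
theorem SplitAllSubStr_py_spec : Claim_equal_SplitAllSubStr_py := by
  intro s _
  unfold Spec_SplitAllSubStr_py SplitAllSubStr_py
  rw [pv_alt_eq,
      pv_key s.toList ((s.toList.length + 1 - 0 : Int).toNat) 0 le_rfl le_rfl]
  simp [List.map_map]
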